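-- pv_equiv track=rewrite | github.com/CriticalHex/CodeQuest | soundex_encoding/soundex_encoding.py | remove_similar
-- ===== SOURCE A (Python) =====
-- def get_numbered_group(c: str):
--     g1 = ("b", "f", "p", "v")
--     g2 = ("c", "g", "j", "k", "q", "s", "x", "z")
--     g3 = ("d", "t")
--     g4 = "l"
--     g5 = ("m", "n")
--     g6 = "r"
--     if c in g1:
--         return g1
--     if c in g2:
--         return g2
--     if c in g3:
--         return g3
--     if c in g4:
--         return g4
--     if c in g5:
--         return g5
--     if c in g6:
--         return g6
--
-- def remove_similar(line: str):
--     wi = ("h", "w")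
--     l = list(line)
--     while True:
--         for i in range(len(l) - 1):
--             first = l[i]
--             if group := get_numbered_group(first):
--                 if l[i + 1] in group or l[i + 1] in wi:  # type: ignore
--                     l.pop(i + 1)
--                     break
--         else:
--             return "".join(l)
-- ===== SOURCE B (Python) =====
-- def group_of(c: str):
--     if c in "bfpv":
--         return 1
--     if c in "cgjkqsxz":
--         return 2
--     if c in "dt":
--         return 3
--     if c == "l":
--         return 4
--     if c in "mn":
--         return 5
--     if c == "r":
--         return 6
--     return None
--
--
-- def remove_similar(line: str):
--     out = []
--     prev_group = None  # soundex group of the last kept character, if any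
--     for c in line:
--         if prev_group is not None and (group_of(c) == prev_group or c in "hw"):
--             continue
--         out.append(c)
--         prev_group = group_of(c)
--     return "".join(out)
-- ===== Notes on version B (the rewrite author's own statement) =====
-- stated objective: faster
-- what changed: Replaced A's restart-from-scratch fixpoint loop (rescan the whole list and pop one character per full pass) with a single left-to-right pass that tracks the soundex group of the last kept character and skips same-group or h/w followers.
import Mathlib
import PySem

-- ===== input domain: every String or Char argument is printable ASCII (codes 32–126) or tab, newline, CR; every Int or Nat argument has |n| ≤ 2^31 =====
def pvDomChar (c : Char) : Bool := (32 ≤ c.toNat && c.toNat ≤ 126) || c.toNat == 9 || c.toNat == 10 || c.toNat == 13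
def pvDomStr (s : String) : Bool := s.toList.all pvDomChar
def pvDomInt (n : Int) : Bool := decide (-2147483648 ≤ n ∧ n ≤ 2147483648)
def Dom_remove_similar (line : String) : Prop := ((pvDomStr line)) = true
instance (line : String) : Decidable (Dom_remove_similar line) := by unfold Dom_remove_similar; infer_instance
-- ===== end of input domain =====

-- B replaces A's restart-after-every-pop fixpoint rescanning with one left-to-right pass
-- tracking the soundex group of the last kept character (measured faster; asymptotic).

-- ===== PORT A =====
-- the tuples g1..g6 of get_numbered_group; 'c in "l"' for a 1-char c is membership in ['l'] (exact)
def pvG1 : List Char := ['b', 'f', 'p', 'v']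
def pvG2 : List Char := ['c', 'g', 'j', 'k', 'q', 's', 'x', 'z']
def pvG3 : List Char := ['d', 't']
def pvG4 : List Char := ['l']
def pvG5 : List Char := ['m', 'n']
def pvG6 : List Char := ['r']

def get_numbered_group (c : Char) : Option (List Char) :=
  if c ∈ pvG1 then some pvG1
  else if c ∈ pvG2 then some pvG2
  else if c ∈ pvG3 then some pvG3
  else if c ∈ pvG4 then some pvG4
  else if c ∈ pvG5 then some pvG5
  else if c ∈ pvG6 then some pvG6
  else none  -- Python's implicit 'return None'

-- the inner 'for i in range(len(l) - 1)' of A: returns some l' after the first pop+break,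
-- none when the loop falls through to the 'else: return'.  l.pop(i+1) = take (i+1) ++ drop (i+2).
-- fuel only makes the index recursion structural; it never changes the computation (called with fuel = l.length).
def pvInnerA (l : List Char) (i : Nat) (fuel : Nat) : Option (List Char) :=
  match fuel with
  | 0 => none
  | fuel + 1 =>
    if h : i < l.length - 1 then
      have h1 : i < l.length := by omega
      have h2 : i + 1 < l.length := by omega
      match get_numbered_group l[i] with
      | some group =>  -- 'if group := get_numbered_group(first):' — a nonempty tuple/str is truthy
        if l[i + 1] ∈ group ∨ l[i + 1] = 'h' ∨ l[i + 1] = 'w' then  -- 'l[i+1] in group or l[i+1] in wi'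
          some (l.take (i + 1) ++ l.drop (i + 2))
        else pvInnerA l (i + 1) fuel
      | none => pvInnerA l (i + 1) fuel
    else none

-- the 'while True' of A; fuel = length + 1 suffices since every pop shortens the list by one
def pvLoopA (fuel : Nat) (l : List Char) : List Char :=
  match fuel with
  | 0 => l
  | fuel + 1 =>
    match pvInnerA l 0 l.length with
    | some l' => pvLoopA fuel l'
    | none => l

def remove_similar (line : String) : String :=
  String.ofList (pvLoopA (line.toList.length + 1) line.toList)  -- '"".join(l)'

-- ===== PORT B =====
-- Source B's group_of: 'c in "bfpv"' for a 1-char c is list membership (exact)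
def pvGroupOf (c : Char) : Option Int :=
  if c ∈ ['b', 'f', 'p', 'v'] then some 1
  else if c ∈ ['c', 'g', 'j', 'k', 'q', 's', 'x', 'z'] then some 2
  else if c ∈ ['d', 't'] then some 3
  else if c = 'l' then some 4
  else if c ∈ ['m', 'n'] then some 5
  else if c = 'r' then some 6
  else none

-- one step of Source B's for-loop; state = (out, prev_group)
def pvStepB (st : List Char × Option Int) (c : Char) : List Char × Option Int :=
  if st.2.isSome ∧ (pvGroupOf c = st.2 ∨ c = 'h' ∨ c = 'w') then st  -- 'continue'
  else (st.1 ++ [c], pvGroupOf c)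

def remove_similar_alt (line : String) : String :=
  String.ofList (line.toList.foldl pvStepB ([], none)).1  -- '"".join(out)'

-- ===== PRECONDITION & SPEC =====
def Spec_remove_similar (line : String) (out : String) : Prop := out = remove_similar_alt line
instance (line : String) (out : String) : Decidable (Spec_remove_similar line out) := by unfold Spec_remove_similar; infer_instance

-- ===== CLAIM (what is proved, stated in full; the proofs are below) =====
def Claim_equal_remove_similar : Prop := ∀ (line : String), Dom_remove_similar line → Spec_remove_similar line (remove_similar line)

-- ===== LEMMAS AND PROOFS =====

-- A's pair condition: first char grouped and follower in the same group or h/w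
def pvDropA (a b : Char) : Bool :=
  match get_numbered_group a with
  | some g => g.contains b || b == 'h' || b == 'w'
  | none => false

-- B's skip condition on (prev_group, next char)
def pvCondB (pg : Option Int) (c : Char) : Bool :=
  pg.isSome && (pvGroupOf c == pg || c == 'h' || c == 'w')

theorem pvCondB_iff (pg : Option Int) (c : Char) :
    pvCondB pg c = true ↔ (pg.isSome ∧ (pvGroupOf c = pg ∨ c = 'h' ∨ c = 'w')) := by
  simp [pvCondB, or_assoc]

-- recursive form of B's single pass
def pvBgo (pg : Option Int) : List Char → List Char
  | [] => []
  | c :: cs => if pvCondB pg c then pvBgo pg cs else c :: pvBgo (pvGroupOf c) cs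

-- structural form of A's inner scan: first removable pair, with the follower popped
def pvSfind : List Char → Option (List Char)
  | a :: b :: rest =>
    if pvDropA a b then some (a :: rest)
    else (pvSfind (b :: rest)).map (a :: ·)
  | _ => none

theorem pv_mem_g1 (b : Char) : b ∈ pvG1 ↔ pvGroupOf b = some 1 := by
  constructor
  · intro h
    simp only [pvG1, List.mem_cons, List.not_mem_nil, or_false] at h
    rcases h with rfl | rfl | rfl | rfl <;> rfl
  · intro h
    unfold pvGroupOf at h
    split_ifs at h <;> simp_all [pvG1]

theorem pv_mem_g2 (b : Char) : b ∈ pvG2 ↔ pvGroupOf b = some 2 := by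
  constructor
  · intro h
    simp only [pvG2, List.mem_cons, List.not_mem_nil, or_false] at h
    rcases h with rfl | rfl | rfl | rfl | rfl | rfl | rfl | rfl <;> rfl
  · intro h
    unfold pvGroupOf at h
    split_ifs at h <;> simp_all [pvG2]

theorem pv_mem_g3 (b : Char) : b ∈ pvG3 ↔ pvGroupOf b = some 3 := by
  constructor
  · intro h
    simp only [pvG3, List.mem_cons, List.not_mem_nil, or_false] at h
    rcases h with rfl | rfl <;> rfl
  · intro h
    unfold pvGroupOf at h
    split_ifs at h <;> simp_all [pvG3]

theorem pv_mem_g4 (b : Char) : b ∈ pvG4 ↔ pvGroupOf b = some 4 := by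
  constructor
  · intro h
    simp only [pvG4, List.mem_cons, List.not_mem_nil, or_false] at h
    subst h; rfl
  · intro h
    unfold pvGroupOf at h
    split_ifs at h <;> simp_all [pvG4]

theorem pv_mem_g5 (b : Char) : b ∈ pvG5 ↔ pvGroupOf b = some 5 := by
  constructor
  · intro h
    simp only [pvG5, List.mem_cons, List.not_mem_nil, or_false] at h
    rcases h with rfl | rfl <;> rfl
  · intro h
    unfold pvGroupOf at h
    split_ifs at h <;> simp_all [pvG5]

theorem pv_mem_g6 (b : Char) : b ∈ pvG6 ↔ pvGroupOf b = some 6 := by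
  constructor
  · intro h
    simp only [pvG6, List.mem_cons, List.not_mem_nil, or_false] at h
    subst h; rfl
  · intro h
    unfold pvGroupOf at h
    split_ifs at h <;> simp_all [pvG6]

-- the two conditions agree once prev_group is the group of the previous kept char
theorem pvCond_eq (a b : Char) : pvDropA a b ↔ pvCondB (pvGroupOf a) b := by
  unfold pvDropA pvCondB
  rcases h : get_numbered_group a with _ | g
  · have ha : pvGroupOf a = none := by
      unfold get_numbered_group at h
      unfold pvGroupOf
      split_ifs at h ⊢ <;> simp_all [pvG1, pvG2, pvG3, pvG4, pvG5, pvG6]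
    simp [ha]
  · unfold get_numbered_group at h
    split_ifs at h with h1 h2 h3 h4 h5 h6 <;> injection h with h <;> subst h
    · rw [(pv_mem_g1 a).mp h1]; simp [pv_mem_g1]
    · rw [(pv_mem_g2 a).mp h2]; simp [pv_mem_g2]
    · rw [(pv_mem_g3 a).mp h3]; simp [pv_mem_g3]
    · rw [(pv_mem_g4 a).mp h4]; simp [pv_mem_g4]
    · rw [(pv_mem_g5 a).mp h5]; simp [pv_mem_g5]
    · rw [(pv_mem_g6 a).mp h6]; simp [pv_mem_g6]

theorem pvFoldB (l : List Char) (out : List Char) (pg : Option Int) :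
    (l.foldl pvStepB (out, pg)).1 = out ++ pvBgo pg l := by
  induction l generalizing out pg with
  | nil => simp [pvBgo]
  | cons c cs ih =>
    simp only [List.foldl_cons, pvBgo]
    by_cases hc : pvCondB pg c
    · have hs : pvStepB (out, pg) c = (out, pg) := by
        unfold pvStepB; rw [if_pos ((pvCondB_iff pg c).mp hc)]
      rw [hs, ih, if_pos hc]
    · have hs : pvStepB (out, pg) c = (out ++ [c], pvGroupOf c) := by
        unfold pvStepB; rw [if_neg (fun hp => hc ((pvCondB_iff pg c).mpr hp))]
      rw [hs, ih, if_neg hc]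
      simp

theorem pvInnerA_eq (l : List Char) : ∀ (fuel i : Nat), l.length - 1 ≤ i + fuel →
    pvInnerA l i fuel = (pvSfind (l.drop i)).map (fun t => l.take i ++ t) := by
  intro fuel
  induction fuel with
  | zero =>
    intro i hf
    rcases hd : l.drop i with _ | ⟨x, _ | ⟨y, t⟩⟩
    · simp [pvInnerA, pvSfind]
    · simp [pvInnerA, pvSfind]
    · exfalso
      have := congrArg List.length hd
      simp at this
      omega
  | succ fuel ih =>
    intro i hf
    by_cases h : i < l.length - 1
    case neg =>
      rcases hd : l.drop i with _ | ⟨x, _ | ⟨y, t⟩⟩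
      · simp [pvInnerA, h, pvSfind]
      · simp [pvInnerA, h, pvSfind]
      · exfalso
        have := congrArg List.length hd
        simp at this
        omega
    case pos =>
      have h1 : i < l.length := by omega
      have h2 : i + 1 < l.length := by omega
      have hd : l.drop i = l[i] :: l[i + 1] :: l.drop (i + 2) := by
        rw [List.drop_eq_getElem_cons h1, List.drop_eq_getElem_cons h2]
      have hd1 : l.drop (i + 1) = l[i + 1] :: l.drop (i + 2) := List.drop_eq_getElem_cons h2
      have ht : l.take (i + 1) = l.take i ++ [l[i]] := by
        rw [List.take_add_one]; simp [List.getElem?_eq_getElem h1]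
      rcases hg : get_numbered_group l[i] with _ | g
      · have hnd : ¬ pvDropA l[i] l[i + 1] := by unfold pvDropA; rw [hg]; simp
        have hrec : pvInnerA l i (fuel + 1) = pvInnerA l (i + 1) fuel := by
          simp only [pvInnerA]; rw [dif_pos h, hg]
        rw [hrec, ih (i + 1) (by omega), hd, hd1]
        simp only [pvSfind, if_neg hnd, Option.map_map]
        congr 1
        funext t
        rw [ht, List.append_assoc]
        rfl
      · by_cases hc : l[i + 1] ∈ g ∨ l[i + 1] = 'h' ∨ l[i + 1] = 'w'
        · have hdrop : pvDropA l[i] l[i + 1] := by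
            unfold pvDropA; rw [hg]; simpa [or_assoc, and_assoc] using hc
          have hrec : pvInnerA l i (fuel + 1) = some (l.take (i + 1) ++ l.drop (i + 2)) := by
            simp only [pvInnerA]; rw [dif_pos h, hg]; exact if_pos hc
          rw [hrec, hd]
          simp only [pvSfind, if_pos hdrop, Option.map_some]
          rw [ht, List.append_assoc]
          rfl
        · have hnd : ¬ pvDropA l[i] l[i + 1] := by
            unfold pvDropA; rw [hg]; simpa [or_assoc, and_assoc] using hc
          have hrec : pvInnerA l i (fuel + 1) = pvInnerA l (i + 1) fuel := by
            simp only [pvInnerA]; rw [dif_pos h, hg]; exact if_neg hc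
          rw [hrec, ih (i + 1) (by omega), hd, hd1]
          simp only [pvSfind, if_neg hnd, Option.map_map]
          congr 1
          funext t
          rw [ht, List.append_assoc]
          rfl

theorem pvSfind_length : ∀ (l m : List Char), pvSfind l = some m → m.length + 1 = l.length := by
  intro l
  induction l using pvSfind.induct with
  | case1 a b rest hdrop =>
    intro m h
    simp only [pvSfind, if_pos hdrop, Option.some.injEq] at h
    subst h
    simp
  | case2 a b rest hnd ih =>
    intro m h
    simp only [pvSfind, if_neg hnd, Option.map_eq_some_iff] at h
    obtain ⟨m', hm', rfl⟩ := h
    have := ih m' hm'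
    simp only [List.length_cons] at this ⊢
    omega
  | case3 l hno =>
    intro m h
    match l, hno, h with
    | [], _, h => simp [pvSfind] at h
    | [x], _, h => simp [pvSfind] at h
    | x :: y :: t, hno, _ => exact absurd rfl (hno x y t)

theorem pvSfind_none : ∀ (l : List Char), pvSfind l = none →
    l.IsChain (fun a b => ¬ pvDropA a b) := by
  intro l
  induction l using pvSfind.induct with
  | case1 a b rest hdrop => intro h; simp [pvSfind, if_pos hdrop] at h
  | case2 a b rest hnd ih =>
    intro h
    simp only [pvSfind, if_neg hnd, Option.map_eq_none_iff] at h
    exact List.isChain_cons_cons.mpr ⟨hnd, ih h⟩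
  | case3 l hno =>
    intro _
    match l, hno with
    | [], _ => exact List.isChain_nil
    | [x], _ => exact List.isChain_singleton x
    | x :: y :: t, hno => exact absurd rfl (hno x y t)

theorem pvBgo_stable : ∀ (l : List Char) (pg : Option Int),
    l.IsChain (fun a b => ¬ pvDropA a b) →
    (∀ a, l.head? = some a → ¬ pvCondB pg a) → pvBgo pg l = l := by
  intro l
  induction l with
  | nil => intro pg _ _; rfl
  | cons c cs ih =>
    intro pg hch hh
    have hc : ¬ pvCondB pg c := hh c rfl
    obtain ⟨hhd, htl⟩ := List.isChain_cons.mp hch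
    simp only [pvBgo, if_neg hc]
    congr 1
    exact ih (pvGroupOf c) htl
      (fun b hb => fun hcb => (hhd b hb) ((pvCond_eq c b).mpr hcb))

theorem pvSfind_some : ∀ (l : List Char), ∀ (l' : List Char) (pg : Option Int),
    pvSfind l = some l' →
    (∀ a, l.head? = some a → ¬ pvCondB pg a) → pvBgo pg l = pvBgo pg l' := by
  intro l
  induction l using pvSfind.induct with
  | case1 a b rest hdrop =>
    intro l' pg h hh
    simp only [pvSfind, if_pos hdrop, Option.some.injEq] at h
    subst h
    have ha : ¬ pvCondB pg a := hh a rfl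
    have hb : pvCondB (pvGroupOf a) b := (pvCond_eq a b).mp hdrop
    simp only [pvBgo, if_neg ha, if_pos hb]
  | case2 a b rest hnd ih =>
    intro l' pg h hh
    simp only [pvSfind, if_neg hnd, Option.map_eq_some_iff] at h
    obtain ⟨m, hm, rfl⟩ := h
    have ha : ¬ pvCondB pg a := hh a rfl
    have hb : ∀ x, (b :: rest).head? = some x → ¬ pvCondB (pvGroupOf a) x := by
      intro x hx hcx
      injection hx with hx
      subst hx
      exact hnd ((pvCond_eq a b).mpr hcx)
    simp only [pvBgo, if_neg ha]
    congr 1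
    exact ih m (pvGroupOf a) hm hb
  | case3 l hno =>
    intro l' pg h hh
    match l, hno, h with
    | [], _, h => simp [pvSfind] at h
    | [x], _, h => simp [pvSfind] at h
    | x :: y :: t, hno, _ => exact absurd rfl (hno x y t)

theorem pvLoopA_eq : ∀ (fuel : Nat) (l : List Char), l.length < fuel →
    pvLoopA fuel l = pvBgo none l := by
  intro fuel
  induction fuel with
  | zero => intro l h; omega
  | succ fuel ih =>
    intro l hlen
    have hsafe : ∀ a, l.head? = some a → ¬ pvCondB none a := by
      intro a _ hc
      simp [pvCondB] at hc
    have he := pvInnerA_eq l l.length 0 (by omega)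
    rcases hs : pvSfind l with _ | m
    · simp only [List.drop_zero, List.take_zero, List.nil_append, hs, Option.map_none] at he
      have hl : pvLoopA (fuel + 1) l = l := by
        simp only [pvLoopA]; rw [he]
      rw [hl]
      exact (pvBgo_stable l none (pvSfind_none l hs) hsafe).symm
    · simp only [List.drop_zero, List.take_zero, List.nil_append, hs, Option.map_some] at he
      have hml : m.length + 1 = l.length := pvSfind_length l m hs
      have hl : pvLoopA (fuel + 1) l = pvLoopA fuel m := by
        simp only [pvLoopA]; rw [he]
      rw [hl, ih m (by omega)]
      exact (pvSfind_some l m none hs hsafe).symm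

-- ===== VERDICT (by name: the statement is the Claim_ definition above) =====
theorem remove_similar_spec : Claim_equal_remove_similar := by
  intro line _
  unfold Spec_remove_similar remove_similar remove_similar_alt
  rw [pvLoopA_eq (line.toList.length + 1) line.toList (by omega), pvFoldB]
  rfl
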